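-- pv_equiv track=rewrite | github.com/UNStats/FIS4SDGs_New | notebooks/scripts/modules/modules01-checkpoint.py | year_intervals
-- ===== SOURCE A (Python) =====
-- def year_intervals (years_list):
--     """ Find the coverage of an ordered list of years"""
--
--     #years_list = [1995,1996, 2000,2001,2002,2003,2004]
--
--     years_list = list(map(float, years_list))
--
--     years_list = list(map(int, years_list))
--
--     n = len(years_list)
--
--     start_y = list()
--     end_y = list()
--
--     start_y.append(years_list[0])
--
--     if n > 1:
--         for i in range(n-1):
--             if(years_list[i+1] - years_list[i]>1):
--                 start_y.append(years_list[i+1])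
--                 end_y.append(years_list[i])
--
--     end_y.append(years_list[n-1])
--
--     interval_yy = list()
--
--     for i in range(len(start_y)):
--
--         if  end_y[i] - start_y[i]> 0 :
--             interval_yy.append(str(start_y[i]) + '-' + str(end_y[i]))
--         else:
--             interval_yy.append(str(start_y[i]))
--
--
--     x = ",".join(interval_yy)
--     return(x)
-- ===== SOURCE B (Python) =====
-- def year_intervals(years_list):
--     """ Find the coverage of an ordered list of years"""
--     years = [int(float(y)) for y in years_list]
--
--     def split(ys):
--         # cut off the leading run at the first gap > 1, loop on the remainder
--         runs = []
--         while True: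
--             for i in range(1, len(ys)):
--                 if ys[i] - ys[i - 1] > 1:
--                     runs.append(ys[:i])
--                     ys = ys[i:]
--                     break
--             else:
--                 runs.append(ys)
--                 return runs
--
--     def fmt(run):
--         if run[-1] - run[0] > 0:
--             return str(run[0]) + "-" + str(run[-1])
--         return str(run[0])
--
--     return ",".join(fmt(run) for run in split(years))
-- ===== Notes on version B (the rewrite author's own statement) =====
-- stated objective: alternative
-- what changed: Replaces A's index loops building parallel start_y/end_y value lists by a divide-at-the-first-gap split of the list into run sublists via slicing, each run then formatted from its first and last element.
import Mathlib
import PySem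

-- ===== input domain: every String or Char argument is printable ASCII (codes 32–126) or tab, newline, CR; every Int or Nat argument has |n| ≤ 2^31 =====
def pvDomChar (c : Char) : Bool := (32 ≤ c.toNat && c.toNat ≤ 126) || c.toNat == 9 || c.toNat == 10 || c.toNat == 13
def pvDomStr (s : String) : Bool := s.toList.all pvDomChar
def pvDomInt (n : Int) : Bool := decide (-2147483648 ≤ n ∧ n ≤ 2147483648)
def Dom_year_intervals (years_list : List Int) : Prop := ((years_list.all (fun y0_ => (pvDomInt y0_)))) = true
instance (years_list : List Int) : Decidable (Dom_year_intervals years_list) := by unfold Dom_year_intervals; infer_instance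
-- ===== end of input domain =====

-- B replaces A's index loops over parallel start_y/end_y lists by a
-- divide-at-the-first-gap split of the list into run sublists (slices), each
-- formatted from its first and last element (objective: alternative decomposition).

-- ===== PORT A =====
-- float() then int() over ints is the identity for |y| ≤ 2^31 (Dom), ported as identity maps
def year_intervals (years_list : List Int) : String :=
  let years := (years_list.map (fun y => y)).map (fun y => y)
  let n : Int := PySem.List.len years
  let start_y : List Int := [PySem.List.pyGetD years 0 0]   -- years_list[0]: IndexError on [] (excluded by Pre_)
  let se : List Int × List Int :=
    if n > 1 then
      (PySem.List.pyRange 0 (n - 1) 1).foldl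
        (fun (st : List Int × List Int) i =>
          if PySem.List.pyGetD years (i + 1) 0 - PySem.List.pyGetD years i 0 > 1 then
            (st.1 ++ [PySem.List.pyGetD years (i + 1) 0], st.2 ++ [PySem.List.pyGetD years i 0])
          else st)
        (start_y, ([] : List Int))
    else (start_y, [])
  let start_y := se.1
  let end_y := se.2 ++ [PySem.List.pyGetD years (n - 1) 0]
  let interval_yy : List String :=
    (PySem.List.pyRange 0 (PySem.List.len start_y) 1).foldl
      (fun acc i =>
        if PySem.List.pyGetD end_y i 0 - PySem.List.pyGetD start_y i 0 > 0 then
          acc ++ [PySem.Int.toStr (PySem.List.pyGetD start_y i 0) ++ "-" ++ PySem.Int.toStr (PySem.List.pyGetD end_y i 0)]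
        else
          acc ++ [PySem.Int.toStr (PySem.List.pyGetD start_y i 0)])
      []
  PySem.Str.join "," interval_yy

-- ===== PORT B =====
-- B's inner loop 'for i in range(1, len(ys)): if ys[i] - ys[i-1] > 1: return i-ish':
-- recursion over the tail carrying the previous element and the running index i
def yiFindGap (prev : Int) (i : Nat) : List Int → Option Nat
  | [] => none
  | y :: ys => if y - prev > 1 then some i else yiFindGap y (i + 1) ys

lemma yiFindGap_bounds : ∀ (ys : List Int) (p : Int) (k i : Nat),
    yiFindGap p k ys = some i → k ≤ i ∧ i - k < ys.length := by
  intro ys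
  induction ys with
  | nil => intro p k i h; simp [yiFindGap] at h
  | cons y ys ih =>
    intro p k i h
    by_cases hg : y - p > 1
    · simp [yiFindGap, hg] at h
      simp only [List.length_cons]
      omega
    · simp only [yiFindGap, hg, if_false] at h
      have := ih y (k + 1) i h
      simp only [List.length_cons]
      omega

-- B's split loop: cut the leading run ys[:i] at the first gap and continue on
-- ys[i:]; the while loop over the shrinking remainder becomes this recursion
def yiSplit (ys : List Int) : List (List Int) :=
  match ys with
  | [] => [[]]
  | y0 :: rest =>
    match hf : yiFindGap y0 1 rest with
    | none => [y0 :: rest]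
    | some i =>
      PySem.List.slice (y0 :: rest) none (some (i : Int)) ::
        yiSplit (PySem.List.slice (y0 :: rest) (some (i : Int)) none)
  termination_by ys.length
  decreasing_by
    rw [PySem.List.slice_from_natCast]
    have := yiFindGap_bounds rest y0 1 i hf
    simp only [List.length_drop, List.length_cons]
    omega

-- fmt(run): 'run[0]-run[-1]' when run[-1] - run[0] > 0, else 'run[0]'
def yiFmtRun (run : List Int) : String :=
  if PySem.List.pyGetD run (-1) 0 - PySem.List.pyGetD run 0 0 > 0 then
    PySem.Int.toStr (PySem.List.pyGetD run 0 0) ++ "-" ++ PySem.Int.toStr (PySem.List.pyGetD run (-1) 0)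
  else PySem.Int.toStr (PySem.List.pyGetD run 0 0)

def year_intervals_alt (years_list : List Int) : String :=
  let years := years_list.map (fun y => y)   -- int(float(y)), identity for |y| ≤ 2^31 (Dom)
  PySem.Str.join "," ((yiSplit years).map yiFmtRun)

-- ===== PRECONDITION & SPEC =====
-- Pre_ excludes only the empty list, on which both A and B raise IndexError (years[0] / run[-1]).
def Pre_year_intervals (years_list : List Int) : Prop := years_list ≠ []
instance (years_list : List Int) : Decidable (Pre_year_intervals years_list) := by
  unfold Pre_year_intervals; infer_instance
def pvWitness_year_intervals : List Int := [1995, 1996, 2000]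

def Spec_year_intervals (years_list : List Int) (out : String) : Prop := out = year_intervals_alt years_list
instance (years_list : List Int) (out : String) : Decidable (Spec_year_intervals years_list out) := by
  unfold Spec_year_intervals; infer_instance

-- ===== CLAIM (what is proved, stated in full; the proofs are below) =====
def Claim_equal_year_intervals : Prop := ∀ (years_list : List Int), Dom_year_intervals years_list → Pre_year_intervals years_list → Spec_year_intervals years_list (year_intervals years_list)

-- ===== LEMMAS AND PROOFS =====

-- the list of (start, end) runs, shared characterization of both ports
def yiRuns (start prev : Int) : List Int → List (Int × Int)
  | [] => [(start, prev)]
  | y :: ys => if y - prev > 1 then (start, prev) :: yiRuns y y ys else yiRuns start y ys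

-- starts after the seed: successors of gaps
def yiGapS (prev : Int) : List Int → List Int
  | [] => []
  | y :: ys => if y - prev > 1 then y :: yiGapS y ys else yiGapS y ys

-- ends before the final one: predecessors of gaps
def yiGapE (prev : Int) : List Int → List Int
  | [] => []
  | y :: ys => if y - prev > 1 then prev :: yiGapE y ys else yiGapE y ys

-- last element of prev :: ys
def yiLast (prev : Int) : List Int → Int
  | [] => prev
  | y :: ys => yiLast y ys

-- A's format of one (start, end) run
def yiFmt (start e : Int) : String :=
  if e - start > 0 then PySem.Int.toStr start ++ "-" ++ PySem.Int.toStr e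
  else PySem.Int.toStr start

lemma yiRuns_fst : ∀ (ys : List Int) (s p : Int),
    (yiRuns s p ys).map Prod.fst = s :: yiGapS p ys := by
  intro ys
  induction ys with
  | nil => intro s p; simp [yiRuns, yiGapS]
  | cons y ys ih =>
    intro s p
    by_cases h : y - p > 1 <;> simp [yiRuns, yiGapS, h, ih]

lemma yiRuns_snd : ∀ (ys : List Int) (s p : Int),
    (yiRuns s p ys).map Prod.snd = yiGapE p ys ++ [yiLast p ys] := by
  intro ys
  induction ys with
  | nil => intro s p; simp [yiRuns, yiGapE, yiLast]
  | cons y ys ih =>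
    intro s p
    by_cases h : y - p > 1 <;> simp [yiRuns, yiGapE, yiLast, h, ih]

-- A's gap loop, rebased to Nat indices, builds [y0]++gapS and gapE
lemma yiGapFold : ∀ (rest : List Int) (y0 : Int) (s e : List Int),
    (List.range rest.length).foldl
      (fun (st : List Int × List Int) k =>
        if (y0 :: rest).getD (k + 1) 0 - (y0 :: rest).getD k 0 > 1 then
          (st.1 ++ [(y0 :: rest).getD (k + 1) 0], st.2 ++ [(y0 :: rest).getD k 0])
        else st)
      (s, e)
    = (s ++ yiGapS y0 rest, e ++ yiGapE y0 rest) := by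
  intro rest
  induction rest with
  | nil => intro y0 s e; simp [yiGapS, yiGapE]
  | cons z zs ih =>
    intro y0 s e
    rw [List.length_cons, List.range_succ_eq_map, List.foldl_cons, List.foldl_map]
    simp only [List.getD_cons_succ, List.getD_cons_zero]
    have ih' := ih z
    simp only [List.getD_cons_succ] at ih'
    by_cases h : z - y0 > 1
    · simp only [h, if_pos]
      rw [ih' (s ++ [z]) (e ++ [y0])]
      simp [yiGapS, yiGapE, h]
    · simp only [h, if_false]
      rw [ih' s e]
      simp [yiGapS, yiGapE, h]

-- A's formatting loop over equal-length start/end lists is a map of yiFmt over the runs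
lemma yiIntervalFold : ∀ (rs : List (Int × Int)) (acc : List String),
    (List.range rs.length).foldl
      (fun acc k =>
        if (rs.map Prod.snd).getD k 0 - (rs.map Prod.fst).getD k 0 > 0 then
          acc ++ [PySem.Int.toStr ((rs.map Prod.fst).getD k 0) ++ "-" ++ PySem.Int.toStr ((rs.map Prod.snd).getD k 0)]
        else
          acc ++ [PySem.Int.toStr ((rs.map Prod.fst).getD k 0)])
      acc
    = acc ++ rs.map (fun r => yiFmt r.1 r.2) := by
  intro rs
  induction rs with
  | nil => intro acc; simp
  | cons r rs ih =>
    intro acc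
    rw [List.length_cons, List.range_succ_eq_map, List.foldl_cons, List.foldl_map]
    simp only [List.map_cons, List.getD_cons_succ, List.getD_cons_zero]
    rw [ih]
    by_cases h : r.2 - r.1 > 0
    · simp only [yiFmt, if_pos h]; simp
    · simp only [yiFmt, if_neg h]; simp

lemma yiLast_eq_getD : ∀ (ys : List Int) (p : Int),
    yiLast p ys = (p :: ys).getD ys.length 0 := by
  intro ys
  induction ys with
  | nil => intro p; simp [yiLast]
  | cons y ys ih => intro p; simpa [yiLast] using ih y

lemma yiLast_eq_getLast : ∀ (ys : List Int) (p : Int) (h : (p :: ys) ≠ []),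
    (p :: ys).getLast h = yiLast p ys := by
  intro ys
  induction ys with
  | nil => intro p h; simp [yiLast]
  | cons y ys ih => intro p h; simpa [yiLast, List.getLast] using ih y (by simp)

lemma yiFmtRun_cons (p : Int) (ys : List Int) :
    yiFmtRun (p :: ys) = yiFmt p (yiLast p ys) := by
  unfold yiFmtRun yiFmt
  rw [PySem.List.pyGetD_neg_one (p :: ys) 0 (by simp), yiLast_eq_getLast]
  simp [PySem.List.pyGetD_zero_cons]

-- no gap found: a single run ending at the last element
lemma yiFindGap_none : ∀ (ys : List Int) (p : Int) (k : Nat),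
    yiFindGap p k ys = none → ∀ s, yiRuns s p ys = [(s, yiLast p ys)] := by
  intro ys
  induction ys with
  | nil => intro p k _ s; simp [yiRuns, yiLast]
  | cons y ys ih =>
    intro p k h s
    by_cases hg : y - p > 1
    · simp [yiFindGap, hg] at h
    · simp only [yiFindGap, hg, if_false] at h
      simp [yiRuns, yiLast, hg, ih y (k + 1) h s]

-- a gap at index k + j: prefix run (take j) closed at its last, recursion on the suffix
lemma yiFindGap_some : ∀ (ys : List Int) (p : Int) (k i : Nat),
    yiFindGap p k ys = some i →
    ∃ j z suf, i = k + j ∧ ys.drop j = z :: suf ∧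
      (∀ s, yiRuns s p ys = (s, yiLast p (ys.take j)) :: yiRuns z z suf) := by
  intro ys
  induction ys with
  | nil => intro p k i h; simp [yiFindGap] at h
  | cons y ys ih =>
    intro p k i h
    by_cases hg : y - p > 1
    · simp [yiFindGap, hg] at h
      exact ⟨0, y, ys, by omega, rfl, fun s => by simp [yiRuns, yiLast, hg]⟩
    · simp only [yiFindGap, hg, if_false] at h
      obtain ⟨j, z, suf, hi, hdrop, hruns⟩ := ih y (k + 1) i h
      exact ⟨j + 1, z, suf, by omega, by simpa using hdrop,
        fun s => by simp [yiRuns, yiLast, hg, hruns s]⟩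

-- B's split, formatted, is A's runs, formatted
lemma yiSplit_runs : ∀ (n : Nat) (y0 : Int) (rest : List Int), rest.length ≤ n →
    (yiSplit (y0 :: rest)).map yiFmtRun = (yiRuns y0 y0 rest).map (fun r => yiFmt r.1 r.2) := by
  intro n
  induction n with
  | zero =>
    intro y0 rest hlen
    have : rest = [] := List.length_eq_zero_iff.mp (by omega)
    subst this
    simp [yiSplit, yiFindGap, yiRuns, yiFmtRun_cons, yiLast]
  | succ n ih =>
    intro y0 rest hlen
    rw [yiSplit]
    split
    next hf =>
      rw [yiFindGap_none rest y0 1 hf y0]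
      simp [yiFmtRun_cons]
    next i hf =>
      obtain ⟨j, z, suf, hi, hdrop, hruns⟩ := yiFindGap_some rest y0 1 i hf
      have hj : j < rest.length := by
        have := congrArg List.length hdrop
        simp only [List.length_drop, List.length_cons] at this
        omega
      have htake : PySem.List.slice (y0 :: rest) none (some (i : Int)) = y0 :: rest.take j := by
        rw [PySem.List.slice_to_natCast]
        subst hi
        rw [show 1 + j = j + 1 from by omega, List.take_succ_cons]
      have hdrop' : PySem.List.slice (y0 :: rest) (some (i : Int)) none = z :: suf := by
        rw [PySem.List.slice_from_natCast]
        subst hi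
        rw [show 1 + j = j + 1 from by omega, List.drop_succ_cons]
        exact hdrop
      have hsuf : suf.length ≤ n := by
        have := congrArg List.length hdrop
        simp only [List.length_drop, List.length_cons] at this
        omega
      rw [htake, hdrop', List.map_cons, ih z suf hsuf, hruns y0]
      simp [yiFmtRun_cons]

-- ===== VERDICT (by name: the statement is the Claim_ definition above) =====
theorem year_intervals_spec : Claim_equal_year_intervals := by
  intro years_list _hdom hpre
  unfold Spec_year_intervals year_intervals year_intervals_alt
  obtain ⟨y0, rest, rfl⟩ : ∃ y0 rest, years_list = y0 :: rest := by
    cases years_list with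
    | nil => exact absurd rfl hpre
    | cons a l => exact ⟨a, l, rfl⟩
  simp only [List.map_id']
  rw [yiSplit_runs rest.length y0 rest (le_refl _)]
  simp only [PySem.List.len_eq, List.length_cons, PySem.List.pyGetD_zero_cons]
  have hse :
      (if (↑(rest.length + 1) : Int) > 1 then
          List.foldl
            (fun (st : List Int × List Int) i =>
              if PySem.List.pyGetD (y0 :: rest) (i + 1) 0 - PySem.List.pyGetD (y0 :: rest) i 0 > 1 then
                (st.1 ++ [PySem.List.pyGetD (y0 :: rest) (i + 1) 0],
                  st.2 ++ [PySem.List.pyGetD (y0 :: rest) i 0])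
              else st)
            ([y0], []) (PySem.List.pyRange 0 (↑(rest.length + 1) - 1))
        else ([y0], []))
      = (y0 :: yiGapS y0 rest, yiGapE y0 rest) := by
    have hc1 : ((rest.length + 1 : Nat) : Int) - 1 = (rest.length : Int) := by push_cast; ring
    by_cases hc : (↑(rest.length + 1) : Int) > 1
    · rw [if_pos hc, hc1, PySem.List.pyRange_zero_nat, List.foldl_map]
      simp only [← Nat.cast_add_one, PySem.List.pyGetD_natCast]
      rw [yiGapFold rest y0 [y0] []]
      simp
    · have hrest : rest = [] := by
        cases rest with
        | nil => rfl
        | cons z zs => exfalso; simp only [List.length_cons] at hc; push_cast at hc; omega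
      subst hrest
      simp [yiGapS, yiGapE]
  rw [hse]
  have hlast : PySem.List.pyGetD (y0 :: rest) ((↑(rest.length + 1) : Int) - 1) 0 = yiLast y0 rest := by
    have hc1 : ((rest.length + 1 : Nat) : Int) - 1 = (rest.length : Int) := by push_cast; ring
    rw [hc1, PySem.List.pyGetD_natCast, ← yiLast_eq_getD]
  rw [hlast]
  have hfst : y0 :: yiGapS y0 rest = (yiRuns y0 y0 rest).map Prod.fst := (yiRuns_fst rest y0 y0).symm
  have hsnd : yiGapE y0 rest ++ [yiLast y0 rest] = (yiRuns y0 y0 rest).map Prod.snd := (yiRuns_snd rest y0 y0).symm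
  rw [hfst, hsnd]
  rw [List.length_map, PySem.List.pyRange_zero_nat, List.foldl_map]
  simp only [PySem.List.pyGetD_natCast]
  rw [yiIntervalFold (yiRuns y0 y0 rest) []]
  simp
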